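-- pv_equiv track=rewrite | github.com/LucXiong/Swarm-intelligence-optimization-algorithm | test_function.py | fu3
-- ===== SOURCE A (Python) =====
-- def fu3(x):
--     # min is 0 at [0 for i in range(len(x)]
--     s1 = 0
--     for i in range(len(x)):
--         s2 = 0
--         for j in range(i):
--             s2 += abs(x[i])
--         s1 += s2 ** 2
--     result = s1
--     return result
-- ===== SOURCE B (Python) =====
-- def fu3(x):
--     # closed form: inner loop adds abs(x[i]) i times, so term = (i*abs(x[i]))**2
--     return sum((i * abs(v)) ** 2 for i, v in enumerate(x))
-- ===== Notes on version B (the rewrite author's own statement) =====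
-- stated objective: faster
-- what changed: replaced the quadratic nested loop by a single pass summing (i*abs(x[i]))**2, the closed form of the inner loop
import Mathlib
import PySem

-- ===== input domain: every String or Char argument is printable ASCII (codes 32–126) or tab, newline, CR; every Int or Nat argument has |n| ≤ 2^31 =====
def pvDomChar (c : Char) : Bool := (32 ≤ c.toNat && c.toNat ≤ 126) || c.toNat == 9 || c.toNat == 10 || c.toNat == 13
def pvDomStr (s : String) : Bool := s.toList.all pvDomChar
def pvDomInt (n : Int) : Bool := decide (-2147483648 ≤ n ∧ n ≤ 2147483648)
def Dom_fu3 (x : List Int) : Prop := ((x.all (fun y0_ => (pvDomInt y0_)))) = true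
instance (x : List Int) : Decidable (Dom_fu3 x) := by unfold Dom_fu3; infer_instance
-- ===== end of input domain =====

-- B replaces A's quadratic nested loop by one pass summing (i*|x[i]|)^2 (objective: faster, asymptotic).

-- ===== PORT A =====
def fu3 (x : List Int) : Int :=
  (PySem.List.pyRange 0 (x.length : Int) 1).foldl (fun s1 i =>
    s1 + ((PySem.List.pyRange 0 i 1).foldl
            (fun s2 _ => s2 + |PySem.List.pyGetD x i 0|) 0) ^ 2) 0

-- ===== PORT B =====
def fu3_alt (x : List Int) : Int :=
  ((PySem.List.enumerate x 0).map (fun p => (p.1 * |p.2|) ^ 2)).sum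

-- ===== PRECONDITION & SPEC =====
def Spec_fu3 (x : List Int) (out : Int) : Prop := out = fu3_alt x
instance (x : List Int) (out : Int) : Decidable (Spec_fu3 x out) := by unfold Spec_fu3; infer_instance

-- ===== CLAIM (what is proved, stated in full; the proofs are below) =====
def Claim_equal_fu3 : Prop := ∀ (x : List Int), Dom_fu3 x → Spec_fu3 x (fu3 x)

-- ===== LEMMAS AND PROOFS =====

-- a fold that adds the constant c once per element is length * c
lemma foldl_const_add (l : List Int) (c s : Int) :
    l.foldl (fun s2 _ => s2 + c) s = s + l.length * c := by
  induction l generalizing s with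
  | nil => simp
  | cons a t ih => simp [List.foldl, ih]; ring

lemma inner_eq (x : List Int) (i : Int) (hi : 0 ≤ i) :
    (PySem.List.pyRange 0 i 1).foldl (fun s2 _ => s2 + |PySem.List.pyGetD x i 0|) 0
      = i * |PySem.List.pyGetD x i 0| := by
  rw [foldl_const_add]
  simp [PySem.List.length_pyRange_one]
  omega

-- ===== VERDICT (by name: the statement is the Claim_ definition above) =====
theorem fu3_spec : Claim_equal_fu3 := by
  intro x _
  unfold Spec_fu3 fu3 fu3_alt
  rw [PySem.List.foldl_add (g := fun i => ((PySem.List.pyRange 0 i 1).foldl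
        (fun s2 _ => s2 + |PySem.List.pyGetD x i 0|) 0) ^ 2)]
  rw [PySem.List.enumerate_eq_map_pyRange (d := 0), List.map_map]
  rw [List.map_congr_left (fun i hi => by
    have h0 : (0:Int) ≤ i := ((PySem.List.mem_pyRange_one).1 hi).1
    show ((PySem.List.pyRange 0 i 1).foldl (fun s2 _ => s2 + |PySem.List.pyGetD x i 0|) 0) ^ 2
        = (i * |PySem.List.pyGetD x i 0|) ^ 2
    rw [inner_eq x i h0])]
  simp
  rfl
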